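-- pv_equiv track=rewrite | github.com/DwightEd/hallucination-detection | src/features/hallucination_spans.py | get_token_hallucination_labels
-- ===== SOURCE A (Python) =====
-- from typing import List, Tuple, Optional, Dict, Any
--
-- def get_token_hallucination_labels(
--     seq_len: int,
--     hallucination_spans: List[List[int]],
-- ) -> List[int]:
--     """Generate token-level 0/1 hallucination labels.
--
--     Args:
--         seq_len: Total sequence length (number of tokens in input)
--         hallucination_spans: List of [start, end_exclusive] token indices
--
--     Returns:
--         List of length seq_len with 0 (not hallucinated) or 1 (hallucinated)
--     """
--     labels = [0] * seq_len
--     for span in hallucination_spans: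
--         if len(span) >= 2:
--             start, end = span[0], span[1]
--             start = max(0, start)
--             end = min(seq_len, end)
--             for i in range(start, end):
--                 labels[i] = 1
--     return labels
-- ===== SOURCE B (Python) =====
-- from typing import List
--
-- def get_token_hallucination_labels(
--     seq_len: int,
--     hallucination_spans: List[List[int]],
-- ) -> List[int]:
--     """Difference-array version: +1 at span start, -1 at span end, then one
--     prefix-sum pass binarized to 0/1 (alternative algorithm, same result)."""
--     n = max(seq_len, 0)
--     diff = [0] * (n + 1)
--     for span in hallucination_spans:
--         if len(span) >= 2:
--             s = max(0, span[0])
--             e = min(n, span[1])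
--             if s < e:
--                 diff[s] += 1
--                 diff[e] -= 1
--     labels = []
--     run = 0
--     for d in diff[:n]:
--         run += d
--         labels.append(1 if run > 0 else 0)
--     return labels
-- ===== Notes on version B (the rewrite author's own statement) =====
-- stated objective: alternative
-- what changed: Replaces the per-index inner loop that writes 1 over every span with a difference array (+1 at clamped start, -1 at clamped end) followed by one prefix-sum pass binarized to 0/1; trades A's O(sum of span lengths) marking for a single O(seq_len) scan.
import Mathlib
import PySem

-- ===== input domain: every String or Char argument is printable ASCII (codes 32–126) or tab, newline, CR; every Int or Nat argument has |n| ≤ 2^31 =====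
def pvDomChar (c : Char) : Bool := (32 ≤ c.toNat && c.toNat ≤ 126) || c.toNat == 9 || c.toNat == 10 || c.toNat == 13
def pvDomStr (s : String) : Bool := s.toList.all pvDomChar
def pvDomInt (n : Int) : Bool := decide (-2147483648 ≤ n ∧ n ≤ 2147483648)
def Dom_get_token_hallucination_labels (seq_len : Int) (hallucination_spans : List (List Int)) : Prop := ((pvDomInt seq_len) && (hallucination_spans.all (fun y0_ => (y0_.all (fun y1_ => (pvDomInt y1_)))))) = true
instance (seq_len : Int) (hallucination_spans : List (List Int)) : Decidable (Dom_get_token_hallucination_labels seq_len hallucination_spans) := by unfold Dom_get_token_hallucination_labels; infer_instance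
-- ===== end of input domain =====

-- B replaces A's per-index marking of every span by a difference array (+1/-1 at the clamped
-- span ends) followed by one prefix-sum pass binarized to 0/1 (an alternative algorithm).

-- ===== PORT A =====
-- A's inner loop: for i in range(start, end): labels[i] = 1   (start ≥ 0 here, so i.toNat is exact)
def pvAmark (labels : List Int) (s e : Int) : List Int :=
  (PySem.List.pyRange s e 1).foldl (fun acc i => acc.set i.toNat 1) labels

-- one iteration of A's "for span in hallucination_spans" (the len(span) >= 2 guard is the match)
def pvAstep (seq_len : Int) (labels : List Int) (span : List Int) : List Int :=
  match span with
  | s0 :: e0 :: _ => pvAmark labels (max 0 s0) (min seq_len e0)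
  | _ => labels

def get_token_hallucination_labels (seq_len : Int) (hallucination_spans : List (List Int)) : List Int :=
  hallucination_spans.foldl (pvAstep seq_len) (List.replicate seq_len.toNat 0)

-- ===== PORT B =====
-- one iteration of B's loop: diff[s] += 1; diff[e] -= 1 (indices in range since 0 ≤ s < e ≤ n)
def pvBstep (n : Int) (d : List Int) (span : List Int) : List Int :=
  match span with
  | s0 :: e0 :: _ =>
      let s := max 0 s0
      let e := min n e0
      if s < e then (d.modify s.toNat (· + 1)).modify e.toNat (· - 1) else d
  | _ => d

-- B's second loop: run += d_; labels.append(1 if run > 0 else 0)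
def pvBscan (run : Int) (d : List Int) : List Int :=
  match d with
  | [] => []
  | x :: rest => (if run + x > 0 then 1 else 0) :: pvBscan (run + x) rest

def get_token_hallucination_labels_alt (seq_len : Int) (hallucination_spans : List (List Int)) : List Int :=
  let n := max seq_len 0
  let diff := hallucination_spans.foldl (pvBstep n) (List.replicate (n.toNat + 1) 0)
  pvBscan 0 (diff.take n.toNat)

-- ===== PRECONDITION & SPEC =====
def Spec_get_token_hallucination_labels (seq_len : Int) (hallucination_spans : List (List Int)) (out : List Int) : Prop := out = get_token_hallucination_labels_alt seq_len hallucination_spans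
instance (seq_len : Int) (hallucination_spans : List (List Int)) (out : List Int) : Decidable (Spec_get_token_hallucination_labels seq_len hallucination_spans out) := by unfold Spec_get_token_hallucination_labels; infer_instance

-- ===== CLAIM (what is proved, stated in full; the proofs are below) =====
def Claim_equal_get_token_hallucination_labels : Prop := ∀ (seq_len : Int) (hallucination_spans : List (List Int)), Dom_get_token_hallucination_labels seq_len hallucination_spans → Spec_get_token_hallucination_labels seq_len hallucination_spans (get_token_hallucination_labels seq_len hallucination_spans)

-- ===== LEMMAS AND PROOFS =====

-- token i is covered by span after clamping into [0, c)
def pvCover (c : Int) (i : Nat) (span : List Int) : Bool :=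
  match span with
  | s0 :: e0 :: _ => decide (max 0 s0 ≤ (i : Int) ∧ (i : Int) < min c e0)
  | _ => false

lemma pvCover_lt (c : Int) (i : Nat) (sp : List Int) (h : pvCover c i sp = true) : (i : Int) < c := by
  match sp with
  | [] => simp [pvCover] at h
  | [x] => simp [pvCover] at h
  | s0 :: e0 :: rest => simp only [pvCover, decide_eq_true_eq] at h; omega

lemma pvAmark_getElem? (labels : List Int) (s e : Int) (hs : 0 ≤ s) (i : Nat) :
    (pvAmark labels s e)[i]? =
      if s ≤ (i : Int) ∧ (i : Int) < e ∧ i < labels.length then some 1 else labels[i]? := by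
  unfold pvAmark
  by_cases h : s < e
  · generalize hk : (e - s).toNat = k
    induction k generalizing s labels with
    | zero => omega
    | succ k ih =>
      rw [PySem.List.pyRange_one_cons h, List.foldl_cons]
      have hsn : (s.toNat : Int) = s := Int.toNat_of_nonneg hs
      by_cases h2 : s + 1 < e
      · rw [ih (labels.set s.toNat 1) (s+1) (by omega) h2 (by omega)]
        rw [List.getElem?_set]
        simp only [List.length_set]
        split_ifs
        all_goals first | rfl | omega | (exact (List.getElem?_eq_none (by omega)).symm)
      · have : e = s + 1 := by omega
        subst this
        rw [PySem.List.pyRange_one_eq_nil (by omega), List.foldl_nil, List.getElem?_set]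
        split_ifs
        all_goals first | rfl | omega | (exact (List.getElem?_eq_none (by omega)).symm)
  · rw [PySem.List.pyRange_one_eq_nil (by omega), List.foldl_nil]
    rw [if_neg (by omega)]

lemma pvAmark_length (labels : List Int) (s e : Int) :
    (pvAmark labels s e).length = labels.length := by
  unfold pvAmark
  generalize PySem.List.pyRange s e 1 = L
  induction L generalizing labels with
  | nil => rfl
  | cons x xs ih => simpa using ih (labels.set x.toNat 1)

lemma foldA_getElem? (seq_len : Int) (spans : List (List Int)) (labels : List Int)
    (hlen : labels.length = seq_len.toNat) (i : Nat) :
    (spans.foldl (pvAstep seq_len) labels)[i]? =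
      if spans.any (pvCover seq_len i) then some 1 else labels[i]? := by
  induction spans generalizing labels with
  | nil => simp
  | cons sp spans ih =>
    rw [List.foldl_cons, List.any_cons]
    match sp with
    | [] => simp only [pvAstep, pvCover, Bool.false_or]; exact ih labels hlen
    | [x] => simp only [pvAstep, pvCover, Bool.false_or]; exact ih labels hlen
    | s0 :: e0 :: rest =>
      have hstep : pvAstep seq_len labels (s0 :: e0 :: rest) = pvAmark labels (max 0 s0) (min seq_len e0) := rfl
      rw [hstep, ih (pvAmark labels (max 0 s0) (min seq_len e0)) (by rw [pvAmark_length]; exact hlen)]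
      rw [pvAmark_getElem? labels _ _ (le_max_left 0 s0) i]
      have hts : seq_len ≤ (seq_len.toNat : Int) := Int.self_le_toNat _
      simp only [pvCover, Bool.or_eq_true, decide_eq_true_eq]
      split_ifs
      all_goals first
        | rfl
        | omega
        | (exfalso; tauto)
        | (exfalso; rcases ‹_ ∨ _› with hor | hor
           · omega
           · tauto)

lemma A_getElem? (seq_len : Int) (spans : List (List Int)) (i : Nat) :
    (get_token_hallucination_labels seq_len spans)[i]? =
      if i < seq_len.toNat then some (if spans.any (pvCover seq_len i) then 1 else 0) else none := by
  unfold get_token_hallucination_labels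
  rw [foldA_getElem? seq_len spans _ (by simp) i, List.getElem?_replicate]
  by_cases hany : spans.any (pvCover seq_len i) = true
  · obtain ⟨sp, _, hsp⟩ := List.any_eq_true.mp hany
    have hlt := pvCover_lt seq_len i sp hsp
    rw [if_pos hany, if_pos (by omega : i < seq_len.toNat), hany]
    rfl
  · rw [Bool.not_eq_true] at hany
    simp [hany]

lemma sum_take_modify (d : List Int) (j m : Nat) (f : Int → Int) :
    ((d.modify j f).take m).sum =
      (d.take m).sum + (if j < m ∧ j < d.length then f (d.getD j 0) - d.getD j 0 else 0) := by
  induction d generalizing j m with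
  | nil => simp
  | cons x xs ih =>
    cases m with
    | zero => simp
    | succ m =>
      cases j with
      | zero => simp [List.getD]; ring
      | succ j =>
        simp only [List.modify_succ_cons, List.take_succ_cons, List.sum_cons, List.length_cons,
          List.getD_cons_succ, ih j m]
        have : (j + 1 < m + 1 ∧ j + 1 < xs.length + 1) ↔ (j < m ∧ j < xs.length) := by omega
        rw [if_congr this rfl rfl]
        split_ifs <;> ring

lemma length_foldB (n : Int) (spans : List (List Int)) (d : List Int) :
    (spans.foldl (pvBstep n) d).length = d.length := by
  induction spans generalizing d with
  | nil => rfl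
  | cons sp spans ih =>
    rw [List.foldl_cons]
    match sp with
    | [] => exact ih d
    | [x] => exact ih d
    | s0 :: e0 :: rest =>
      rw [ih]
      simp only [pvBstep]
      split_ifs <;> simp

lemma foldB_sum (n : Int) (spans : List (List Int)) (d : List Int)
    (hd : d.length = n.toNat + 1) (i : Nat) (hi : i < n.toNat) :
    ((spans.foldl (pvBstep n) d).take (i+1)).sum =
      (d.take (i+1)).sum + (spans.countP (pvCover n i) : Int) := by
  induction spans generalizing d with
  | nil => simp
  | cons sp spans ih =>
    rw [List.foldl_cons, List.countP_cons]
    match sp with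
    | [] => simp only [pvBstep, pvCover]; rw [ih d hd]; simp
    | [x] => simp only [pvBstep, pvCover]; rw [ih d hd]; simp
    | s0 :: e0 :: rest =>
      by_cases hse : max 0 s0 < min n e0
      · have hstep : pvBstep n d (s0 :: e0 :: rest) =
            (d.modify (max 0 s0).toNat (· + 1)).modify (min n e0).toNat (· - 1) := by
          simp only [pvBstep]; rw [if_pos hse]
        rw [hstep, ih _ (by simp only [List.length_modify]; exact hd)]
        have hs0 : ((max 0 s0).toNat : Int) = max 0 s0 := Int.toNat_of_nonneg (le_max_left 0 s0)
        have he0 : ((min n e0).toNat : Int) = min n e0 := Int.toNat_of_nonneg (by omega)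
        simp only [sum_take_modify, List.length_modify, pvCover, decide_eq_true_eq]
        split_ifs <;> push_cast <;> omega
      · have hstep : pvBstep n d (s0 :: e0 :: rest) = d := by
          simp only [pvBstep]; rw [if_neg hse]
        rw [hstep, ih d hd]
        have : pvCover n i (s0 :: e0 :: rest) = false := by
          simp only [pvCover, decide_eq_false_iff_not]; omega
        rw [this]
        simp

lemma pvBscan_getElem? (d : List Int) (run : Int) (i : Nat) :
    (pvBscan run d)[i]? =
      if i < d.length then some (if run + (d.take (i+1)).sum > 0 then 1 else 0) else none := by
  induction d generalizing run i with
  | nil => simp [pvBscan]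
  | cons x xs ih =>
    cases i with
    | zero => simp [pvBscan]
    | succ i =>
      simp only [pvBscan, List.getElem?_cons_succ, ih (run + x) i, List.length_cons,
        List.take_succ_cons, List.sum_cons]
      have : (i < xs.length) ↔ (i + 1 < xs.length + 1) := by omega
      rw [if_congr this rfl rfl]
      split_ifs <;> first | rfl | (exfalso; omega)

lemma B_getElem? (seq_len : Int) (spans : List (List Int)) (i : Nat) :
    (get_token_hallucination_labels_alt seq_len spans)[i]? =
      if i < seq_len.toNat then
        some (if spans.any (pvCover seq_len i) then 1 else 0) else none := by
  show (pvBscan 0 ((spans.foldl (pvBstep (max seq_len 0))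
      (List.replicate ((max seq_len 0).toNat + 1) 0)).take (max seq_len 0).toNat))[i]? = _
  have hnn : (max seq_len 0).toNat = seq_len.toNat := by omega
  have hlen : ((spans.foldl (pvBstep (max seq_len 0))
      (List.replicate ((max seq_len 0).toNat + 1) 0)).take (max seq_len 0).toNat).length
      = seq_len.toNat := by
    rw [List.length_take, length_foldB, List.length_replicate]
    omega
  rw [pvBscan_getElem?, hlen]
  by_cases hi : i < seq_len.toNat
  · have hpos : 0 < seq_len := by omega
    have hmax : max seq_len 0 = seq_len := by omega
    rw [if_pos hi, if_pos hi, List.take_take]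
    have hmin : min (i+1) (max seq_len 0).toNat = i + 1 := by omega
    rw [hmin, foldB_sum (max seq_len 0) spans _ (by simp) i (by omega)]
    have hrep : ((List.replicate ((max seq_len 0).toNat + 1) (0:Int)).take (i+1)).sum = 0 := by
      rw [List.take_replicate]
      simp
    rw [hrep, hmax]
    have hiff : spans.any (pvCover seq_len i) = true ↔ 0 < spans.countP (pvCover seq_len i) := by
      rw [List.any_eq_true, List.countP_pos_iff]
    split_ifs with h1 h2 <;> first | rfl | (exfalso; rw [hiff] at *; omega)
  · rw [if_neg hi, if_neg hi]

-- ===== VERDICT (by name: the statement is the Claim_ definition above) =====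
theorem get_token_hallucination_labels_spec : Claim_equal_get_token_hallucination_labels := by
  intro seq_len spans _
  unfold Spec_get_token_hallucination_labels
  apply List.ext_getElem?
  intro i
  rw [A_getElem?, B_getElem?]
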